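-- pv_equiv track=rewrite | github.com/Benhooky/Tinkoff-Start-Autumn | 5.py | count_states
-- ===== SOURCE A (Python) =====
-- def find_parent(parent, v):
--     if parent[v] == v:
--         return v
--     parent[v] = find_parent(parent, parent[v])
--     return parent[v]
--
-- def union_sets(parent, a, b):
--     a = find_parent(parent, a)
--     b = find_parent(parent, b)
--     if a != b:
--         parent[b] = a
--
-- def count_states(n, roads, X):
--     parent = [i for i in range(n)]
--     states = n
--
--     for u, v, w in roads:
--         if w >= X:
--             if find_parent(parent, u) != find_parent(parent, v):
--                 union_sets(parent, u, v)
--                 states -= 1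
--
--     return states
-- ===== SOURCE B (Python) =====
-- def count_states(n, roads, X):
--     # Label-array component counting: comp[i] is the label of i's component
--     # (no union-find forest, no recursion). Merging relabels one class in a pass.
--     comp = list(range(n))
--     states = n
--     for u, v, w in roads:
--         if w >= X:
--             cu, cv = comp[u], comp[v]
--             if cu != cv:
--                 comp = [cu if c == cv else c for c in comp]
--                 states -= 1
--     return states
-- ===== Notes on version B (the rewrite author's own statement) =====
-- stated objective: alternative
-- what changed: Replaces the recursive union-find forest with path compression by a flat component-label array: each qualifying edge compares the two endpoint labels and, when they differ, relabels one class in a single pass over the array - no parent pointers, no find, no recursion.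
import Mathlib
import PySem

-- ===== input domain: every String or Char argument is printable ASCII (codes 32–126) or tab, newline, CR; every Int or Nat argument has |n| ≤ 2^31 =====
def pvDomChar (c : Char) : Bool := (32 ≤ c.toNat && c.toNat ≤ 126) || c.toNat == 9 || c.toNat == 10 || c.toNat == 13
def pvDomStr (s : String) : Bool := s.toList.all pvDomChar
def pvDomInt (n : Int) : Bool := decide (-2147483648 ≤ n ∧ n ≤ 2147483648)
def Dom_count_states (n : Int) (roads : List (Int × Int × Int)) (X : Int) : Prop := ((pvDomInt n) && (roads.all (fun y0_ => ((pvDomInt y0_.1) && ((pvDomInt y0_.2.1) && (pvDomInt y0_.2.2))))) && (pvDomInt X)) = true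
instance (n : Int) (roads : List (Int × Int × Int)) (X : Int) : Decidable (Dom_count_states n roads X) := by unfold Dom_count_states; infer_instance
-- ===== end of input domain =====

-- B replaces A's recursive path-compressing union-find forest by a flat component-label
-- array relabeled in one pass per merge (objective: alternative; not claimed faster).

-- ===== PORT A =====
-- find_parent(parent, v): Python's recursion ported with fuel; callers pass length+1,
-- which the proof shows suffices on every input admitted by Pre_. none = IndexError.
def findParent (fuel : Nat) (parent : List Int) (v : Int) : Option (List Int × Int) :=
  match fuel with
  | 0 => none
  | f + 1 =>
    match PySem.List.pyGet? parent v with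
    | none => none
    | some pv =>
      if pv = v then some (parent, v)
      else
        match findParent f parent pv with
        | none => none
        | some (p1, r) =>
          -- parent[v] = find_parent(parent, parent[v]); return parent[v] (= r just stored)
          match PySem.List.pySet? p1 v r with
          | none => none
          | some p2 => some (p2, r)

def unionSets (fuel : Nat) (parent : List Int) (a b : Int) : Option (List Int) :=
  match findParent fuel parent a with
  | none => none
  | some (p1, ra) =>
    match findParent fuel p1 b with
    | none => none
    | some (p2, rb) =>
      if ra ≠ rb then PySem.List.pySet? p2 rb ra else some p2

-- one iteration of A's 'for u, v, w in roads' loop (state (parent, states); none = raised)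
def stepA (X : Int) (st : Option (List Int × Int)) (e : Int × Int × Int) : Option (List Int × Int) :=
  match st with
  | none => none
  | some (p, s) =>
    if e.2.2 ≥ X then
      match findParent (p.length + 1) p e.1 with
      | none => none
      | some (p1, ru) =>
        match findParent (p1.length + 1) p1 e.2.1 with
        | none => none
        | some (p2, rv) =>
          if ru ≠ rv then
            match unionSets (p2.length + 1) p2 e.1 e.2.1 with
            | none => none
            | some p3 => some (p3, s - 1)
          else some (p2, s)
    else some (p, s)

def count_states (n : Int) (roads : List (Int × Int × Int)) (X : Int) : Int :=
  match roads.foldl (stepA X) (some (PySem.List.pyRange 0 n 1, n)) with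
  | some (_, s) => s
  | none => 0  -- unreachable under Pre_ (Python raises IndexError there)

-- ===== PORT B =====
-- one iteration of B's loop (state (comp, states); none = IndexError)
def stepB (X : Int) (st : Option (List Int × Int)) (e : Int × Int × Int) : Option (List Int × Int) :=
  match st with
  | none => none
  | some (c, s) =>
    if e.2.2 ≥ X then
      match PySem.List.pyGet? c e.1, PySem.List.pyGet? c e.2.1 with
      | some cu, some cv =>
        if cu ≠ cv then some (c.map (fun x => if x = cv then cu else x), s - 1)
        else some (c, s)
      | _, _ => none
    else some (c, s)

def count_states_alt (n : Int) (roads : List (Int × Int × Int)) (X : Int) : Int :=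
  match roads.foldl (stepB X) (some (PySem.List.pyRange 0 n 1, n)) with
  | some (_, s) => s
  | none => 0  -- unreachable under Pre_

-- ===== PRECONDITION & SPEC =====
-- Pre_ excludes exactly the inputs where Python A raises IndexError: some road with
-- weight ≥ X has an endpoint outside [-n, n) (the parent list has length max(n,0)).
def Pre_count_states (n : Int) (roads : List (Int × Int × Int)) (X : Int) : Prop :=
  ∀ e ∈ roads, e.2.2 ≥ X →
    PySem.Raise.InRange n.toNat e.1 ∧ PySem.Raise.InRange n.toNat e.2.1
instance (n : Int) (roads : List (Int × Int × Int)) (X : Int) : Decidable (Pre_count_states n roads X) := by unfold Pre_count_states; infer_instance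

def pvWitness_count_states : Int × (List (Int × Int × Int)) × Int :=
  (4, [(0, 1, 5), (1, 2, 1), (-1, 2, 7), (3, 3, 9)], 3)

def Spec_count_states (n : Int) (roads : List (Int × Int × Int)) (X : Int) (out : Int) : Prop := out = count_states_alt n roads X
instance (n : Int) (roads : List (Int × Int × Int)) (X : Int) (out : Int) : Decidable (Spec_count_states n roads X out) := by unfold Spec_count_states; infer_instance

-- ===== CLAIM (what is proved, stated in full; the proofs are below) =====
def Claim_equal_count_states : Prop := ∀ (n : Int) (roads : List (Int × Int × Int)) (X : Int), Dom_count_states n roads X → Pre_count_states n roads X → Spec_count_states n roads X (count_states n roads X)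

-- ===== LEMMAS AND PROOFS =====

def pget (p : List Int) (i : Nat) : Nat := (p.getD i 0).toNat
def EntOK (p : List Int) : Prop := ∀ i < p.length, 0 ≤ p.getD i 0 ∧ p.getD i 0 < (p.length : Int)
def rootF : Nat → List Int → Nat → Option Nat
  | 0, _, _ => none
  | f + 1, p, i => if pget p i = i then some i else rootF f p (pget p i)

theorem pget_lt {p : List Int} (h : EntOK p) {i : Nat} (hi : i < p.length) : pget p i < p.length := by
  have := h i hi; unfold pget; omega

theorem rootF_mono {f g : Nat} (hfg : f ≤ g) : ∀ {p : List Int} {i r : Nat},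
    rootF f p i = some r → rootF g p i = some r := by
  induction g generalizing f with
  | zero => intro p i r h; interval_cases f; simp [rootF] at h
  | succ g ih =>
    intro p i r h
    match f, h with
    | fa + 1, h =>
      rw [rootF] at h ⊢
      split at h <;> split
      · exact h
      · simp_all
      · simp_all
      · exact ih (by omega) h

theorem rootF_unique {f g : Nat} {p : List Int} {i r s : Nat}
    (h1 : rootF f p i = some r) (h2 : rootF g p i = some s) : r = s := by
  rcases Nat.le_total f g with hle | hle
  · have := rootF_mono hle h1; rw [this] at h2; exact (Option.some_inj.mp h2)
  · have := rootF_mono hle h2; rw [this] at h1; exact (Option.some_inj.mp h1).symm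

theorem rootF_fix {f : Nat} {p : List Int} {i r : Nat} (h : rootF f p i = some r) :
    pget p r = r := by
  induction f generalizing i with
  | zero => simp [rootF] at h
  | succ f ih =>
    rw [rootF] at h
    split at h
    · cases h; omega
    · exact ih h

theorem rootF_of_fix {f : Nat} {p : List Int} {i : Nat} (h : pget p i = i) (hf : 1 ≤ f) :
    rootF f p i = some i := by
  match f with
  | g + 1 => rw [rootF]; simp [h]

theorem root_lt {f : Nat} {p : List Int} (hE : EntOK p) {i r : Nat} (hi : i < p.length)
    (h : rootF f p i = some r) : r < p.length := by
  induction f generalizing i with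
  | zero => simp [rootF] at h
  | succ f ih =>
    rw [rootF] at h
    split at h
    · cases h; exact hi
    · exact ih (pget_lt hE hi) h

def pathF : Nat → List Int → Nat → Option (List Nat)
  | 0, _, _ => none
  | f + 1, p, i => if pget p i = i then some [i] else (pathF f p (pget p i)).map (i :: ·)

theorem pathF_ne_nil {f : Nat} {p : List Int} {i : Nat} {xs : List Nat}
    (h : pathF f p i = some xs) : xs ≠ [] := by
  induction f generalizing i xs with
  | zero => simp [pathF] at h
  | succ f ih =>
    rw [pathF] at h
    split at h
    · cases h; simp
    · rcases Option.map_eq_some_iff.mp h with ⟨ys, hy, rfl⟩; simp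

theorem getLast?_cons_ne {α : Type} (a : α) (ys : List α) (h : ys ≠ []) :
    (a :: ys).getLast? = ys.getLast? := by
  cases ys with
  | nil => simp at h
  | cons b t => simp [List.getLast?_cons_cons]

theorem pathF_root {f : Nat} {p : List Int} {i : Nat} {xs : List Nat}
    (h : pathF f p i = some xs) : rootF xs.length p i = xs.getLast? := by
  induction f generalizing i xs with
  | zero => simp [pathF] at h
  | succ f ih =>
    rw [pathF] at h
    split at h
    · cases h; simp [rootF, *]
    · rcases Option.map_eq_some_iff.mp h with ⟨ys, hy, rfl⟩
      have hne := pathF_ne_nil hy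
      rw [List.length_cons, rootF, if_neg ‹¬ pget p i = i›, ih hy,
        getLast?_cons_ne i ys hne]

theorem rootF_path {f : Nat} {p : List Int} {i r : Nat} (h : rootF f p i = some r) :
    ∃ xs, pathF f p i = some xs ∧ xs.getLast? = some r := by
  induction f generalizing i with
  | zero => simp [rootF] at h
  | succ f ih =>
    rw [rootF] at h
    rw [pathF]
    split at h
    · obtain rfl := Option.some_inj.mp h
      exact ⟨[i], by simp [‹pget p i = i›], by simp⟩
    · rcases ih h with ⟨ys, hy, hl⟩
      refine ⟨i :: ys, by simp only [if_neg ‹_›, hy, Option.map_some], ?_⟩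
      rw [getLast?_cons_ne i ys (pathF_ne_nil hy)]; exact hl

theorem pathF_unique {f g : Nat} {p : List Int} {i : Nat} {xs ys : List Nat}
    (h1 : pathF f p i = some xs) (h2 : pathF g p i = some ys) : xs = ys := by
  induction f generalizing g i xs ys with
  | zero => simp [pathF] at h1
  | succ f ih =>
    match g with
    | 0 => simp [pathF] at h2
    | g + 1 =>
      rw [pathF] at h1 h2
      split at h1
      · rw [if_pos ‹_›] at h2; cases h1; cases h2; rfl
      · rw [if_neg ‹_›] at h2
        rcases Option.map_eq_some_iff.mp h1 with ⟨as, ha, rfl⟩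
        rcases Option.map_eq_some_iff.mp h2 with ⟨bs, hb, rfl⟩
        rw [ih ha hb]

theorem pathF_mem {f : Nat} {p : List Int} {i x : Nat} {xs : List Nat}
    (h : pathF f p i = some xs) (hx : x ∈ xs) :
    ∃ g zs, pathF g p x = some zs ∧ zs.length ≤ xs.length ∧ (x ≠ i → zs.length < xs.length) := by
  induction f generalizing i xs with
  | zero => simp [pathF] at h
  | succ f ih =>
    rw [pathF] at h
    split at h
    · cases h; simp at hx; subst hx
      exact ⟨f + 1, [x], by rw [pathF]; simp [*], le_rfl, by tauto⟩
    · rcases Option.map_eq_some_iff.mp h with ⟨ys, hy, rfl⟩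
      rcases List.mem_cons.mp hx with rfl | hxy
      · exact ⟨f + 1, x :: ys, by rw [pathF]; simp [*], le_rfl, by tauto⟩
      · rcases ih hy hxy with ⟨g, zs, hz, hle, _⟩
        exact ⟨g, zs, hz, by simp; omega, fun _ => by simp; omega⟩

theorem pathF_nodup {f : Nat} {p : List Int} {i : Nat} {xs : List Nat}
    (h : pathF f p i = some xs) : xs.Nodup := by
  induction f generalizing i xs with
  | zero => simp [pathF] at h
  | succ f ih =>
    rw [pathF] at h
    split at h
    · cases h; simp
    · rcases Option.map_eq_some_iff.mp h with ⟨ys, hy, rfl⟩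
      refine List.nodup_cons.mpr ⟨fun hmem => ?_, ih hy⟩
      rcases pathF_mem hy hmem with ⟨g, zs, hz, hle, _⟩
      have heq : zs = i :: ys := pathF_unique hz (show pathF (f+1) p i = some (i :: ys) by simp [pathF, ‹¬ pget p i = i›, hy])
      subst heq; simp at hle

theorem pathF_lt {f : Nat} {p : List Int} (hE : EntOK p) {i : Nat} (hi : i < p.length)
    {xs : List Nat} (h : pathF f p i = some xs) : ∀ x ∈ xs, x < p.length := by
  induction f generalizing i xs with
  | zero => simp [pathF] at h
  | succ f ih =>
    rw [pathF] at h
    split at h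
    · cases h; simpa using hi
    · rcases Option.map_eq_some_iff.mp h with ⟨ys, hy, rfl⟩
      intro x hx
      rcases List.mem_cons.mp hx with rfl | hxy
      · exact hi
      · exact ih (pget_lt hE hi) hy x hxy

theorem fuel_boost {f : Nat} {p : List Int} (hE : EntOK p) {i r : Nat} (hi : i < p.length)
    (h : rootF f p i = some r) : rootF p.length p i = some r := by
  rcases rootF_path h with ⟨xs, hx, hl⟩
  have hroot := pathF_root hx
  rw [hl] at hroot
  have hnd := pathF_nodup hx
  have hlt := pathF_lt hE hi hx
  have hsub : xs ⊆ List.range p.length := fun x hx => List.mem_range.mpr (hlt x hx)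
  have hlen : xs.length ≤ p.length := by
    calc xs.length = xs.toFinset.card := (List.toFinset_card_of_nodup hnd).symm
      _ ≤ (Finset.range p.length).card := Finset.card_le_card
            (by intro x hx; simp at hx ⊢; exact List.mem_range.mp (hsub hx))
      _ = p.length := Finset.card_range _
  exact rootF_mono hlen hroot

theorem pget_set_self {p : List Int} {v : Nat} (hv : v < p.length) (r : Nat) :
    pget (p.set v ((r : Nat) : Int)) v = r := by
  unfold pget
  rw [List.getD_eq_getElem _ _ (by simpa using hv)]
  simp [List.getElem_set_self]

theorem pget_set_ne {p : List Int} {v x : Nat} (hne : x ≠ v) (a : Int) :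
    pget (p.set v a) x = pget p x := by
  unfold pget
  by_cases hx : x < p.length
  · rw [List.getD_eq_getElem _ _ (by simpa using hx), List.getD_eq_getElem _ _ hx]
    simp [List.getElem_set_ne (Ne.symm hne)]
  · rw [List.getD_eq_default _ _ (by simpa using Nat.le_of_not_lt hx),
      List.getD_eq_default _ _ (Nat.le_of_not_lt hx)]

theorem EntOK_set {p : List Int} (hE : EntOK p) {v r : Nat} (hr : r < p.length) :
    EntOK (p.set v ((r : Nat) : Int)) := by
  intro i hi
  simp only [List.length_set] at hi ⊢
  by_cases hiv : i = v
  · subst hiv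
    have : pget (p.set i ((r : Nat) : Int)) i = r := pget_set_self hi r
    unfold pget at this
    constructor
    · rw [List.getD_eq_getElem _ _ (by simpa using hi)]; simp
    · rw [List.getD_eq_getElem _ _ (by simpa using hi)]; simp [List.getElem_set_self]; omega
  · have := hE i hi
    have hgd : (p.set v ((r:Nat):Int)).getD i 0 = p.getD i 0 := by
      by_cases hx : i < p.length
      · rw [List.getD_eq_getElem _ _ (by simpa using hx), List.getD_eq_getElem _ _ hx]
        simp [List.getElem_set_ne (Ne.symm hiv)]
      · omega
    rw [hgd]; exact this

-- path compression preserves every root (the new pointer jumps straight to the root)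
theorem set_keep {p : List Int} {v r : Nat}
    (hroot : ∃ g, rootF g p v = some r) :
    ∀ {f i s : Nat}, rootF f p i = some s → rootF f (p.set v ((r : Nat) : Int)) i = some s := by
  intro f
  induction f with
  | zero => intro i s h; simp [rootF] at h
  | succ f ih =>
    intro i s h
    rcases hroot with ⟨g, hg⟩
    by_cases hv : v < p.length
    case neg =>
      -- set out of range is the identity
      rw [List.set_eq_of_length_le (Nat.le_of_not_lt hv)]
      exact h
    rw [rootF] at h
    by_cases hiv : i = v
    · subst hiv
      have hs : s = r := rootF_unique (show rootF (f+1) p i = some s by rw [rootF]; exact h) hg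
      subst hs
      by_cases hfix : pget p i = i
      · rw [if_pos hfix] at h
        obtain rfl := Option.some_inj.mp h
        -- i is its own root: the set writes i at i
        exact rootF_of_fix (by rw [pget_set_self hv]) (by omega)
      · rw [if_neg hfix] at h
        -- chain has length ≥ 2, so f ≥ 1
        have hf1 : 1 ≤ f := by
          cases f with
          | zero => simp [rootF] at h
          | succ f => omega
        have hfixr : pget p s = s := rootF_fix h
        rw [rootF, pget_set_self hv]
        by_cases hri : s = i
        · subst hri; simp
        · rw [if_neg hri]
          have : pget (p.set i ((s:Nat):Int)) s = s := by rw [pget_set_ne hri]; exact hfixr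
          exact rootF_of_fix this hf1
    · split at h
      · obtain rfl := Option.some_inj.mp h
        rw [rootF, if_pos (by rw [pget_set_ne hiv]; assumption)]
      · rw [rootF]
        rw [if_neg (by rw [pget_set_ne hiv]; assumption), pget_set_ne hiv]
        exact ih h

-- union: redirecting root rb to root ra maps every root s to (if s = rb then ra else s)
theorem union_shift {p : List Int} {ra rb : Nat}
    (hra : pget p ra = ra) (hrbfix : pget p rb = rb) (hrb : rb < p.length) (hne : ra ≠ rb) :
    ∀ {f i s : Nat}, rootF f p i = some s →
      rootF (f + 1) (p.set rb ((ra : Nat) : Int)) i = some (if s = rb then ra else s) := by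
  intro f
  induction f with
  | zero => intro i s h; simp [rootF] at h
  | succ f ih =>
    intro i s h
    rw [rootF] at h
    split at h
    · obtain rfl := Option.some_inj.mp h
      by_cases hib : i = rb
      · subst hib
        rw [if_pos rfl, rootF, pget_set_self hrb, if_neg hne]
        exact rootF_of_fix (by rw [pget_set_ne hne]; exact hra) (by omega)
      · rw [if_neg hib, rootF, if_pos (by rw [pget_set_ne hib]; assumption)]
    · have hib : i ≠ rb := fun hh => ‹¬ pget p i = i› (by rw [hh]; exact hrbfix)
      rw [rootF, if_neg (by rw [pget_set_ne hib]; assumption), pget_set_ne hib]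
      exact ih h

def canonIx (len : Nat) (v : Int) : Nat := if 0 ≤ v then v.toNat else len - (-v).toNat

theorem pyIdx_canon {len : Nat} {v : Int} (h : PySem.Raise.InRange len v) :
    PySem.List.pyIdx? len v = some (canonIx len v) ∧ canonIx len v < len := by
  obtain ⟨h1, h2⟩ := h
  unfold PySem.List.pyIdx? canonIx
  split_ifs <;> constructor <;> first | rfl | omega

theorem getD_cast {p : List Int} (hE : EntOK p) {i : Nat} (hi : i < p.length) :
    p.getD i 0 = ((pget p i : Nat) : Int) := by
  unfold pget; have := hE i hi; omega

theorem pyGet_nat {p : List Int} {i : Nat} (hi : i < p.length) :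
    PySem.List.pyGet? p ((i : Nat) : Int) = some (p.getD i 0) := by
  rw [PySem.List.pyGet?_natCast, List.getElem?_eq_getElem hi, List.getD_eq_getElem _ _ hi]

theorem fp_specN : ∀ (fuel : Nat) (p : List Int), EntOK p → ∀ i r : Nat, i < p.length →
    rootF fuel p i = some r →
    ∃ p', findParent fuel p ((i : Nat) : Int) = some (p', ((r : Nat) : Int)) ∧
      p'.length = p.length ∧ EntOK p' ∧
      (∀ f j s, rootF f p j = some s → rootF f p' j = some s) := by
  intro fuel
  induction fuel with
  | zero => intro p _ i r _ h; simp [rootF] at h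
  | succ fuel ih =>
    intro p hE i r hi h
    have horig := h
    rw [rootF] at h
    by_cases hfix : pget p i = i
    · rw [if_pos hfix] at h
      obtain rfl := Option.some_inj.mp h
      refine ⟨p, ?_, rfl, hE, fun _ _ _ hh => hh⟩
      rw [findParent, pyGet_nat hi, getD_cast hE hi]
      simp [hfix]
    · rw [if_neg hfix] at h
      have hj : pget p i < p.length := pget_lt hE hi
      rcases ih p hE (pget p i) r hj h with ⟨p1, hfp, hlen, hE1, hpres⟩
      have hr : r < p.length := root_lt hE hi horig
      have hset : PySem.List.pySet? p1 ((i:Nat):Int) ((r:Nat):Int) = some (p1.set i ((r:Nat):Int)) :=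
        PySem.List.pySet?_natCast p1 i _ (by omega)
      refine ⟨p1.set i ((r:Nat):Int), ?_, by simp [hlen], EntOK_set hE1 (by omega), ?_⟩
      · have hne : ((pget p i : Nat) : Int) ≠ ((i : Nat) : Int) := by
          intro hh; exact hfix (by exact_mod_cast hh)
        simp only [findParent, pyGet_nat hi, getD_cast hE hi, hfp, hset, if_neg hne]
      · intro f j s hs
        exact set_keep ⟨fuel + 1, hpres _ _ _ horig⟩ (hpres _ _ _ hs)

theorem fp_specI {p : List Int} (hE : EntOK p) {v : Int} (hIn : PySem.Raise.InRange p.length v)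
    {r : Nat} (h : rootF p.length p (canonIx p.length v) = some r) :
    ∃ p', findParent (p.length + 1) p v = some (p', ((r:Nat):Int)) ∧
      p'.length = p.length ∧ EntOK p' ∧
      (∀ f j s, rootF f p j = some s → rootF f p' j = some s) := by
  by_cases hv : 0 ≤ v
  · have hcv : v = ((canonIx p.length v : Nat) : Int) := by
      unfold canonIx; rw [if_pos hv]; omega
    rw [hcv]
    exact fp_specN (p.length + 1) p hE _ r ((pyIdx_canon hIn).2)
      (rootF_mono (Nat.le_succ _) h)
  · -- negative index: the first comparison parent[v] == v is always False (entries ≥ 0 > v)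
    set c := canonIx p.length v with hc0
    have hc := pyIdx_canon hIn
    rw [← hc0] at hc
    have hclen : c < p.length := hc.2
    have hget : PySem.List.pyGet? p v = some (p.getD (c) 0) := by
      unfold PySem.List.pyGet?
      rw [hc.1]
      simp [List.getElem?_eq_getElem hclen]
    have hrootj : rootF p.length p (pget p (c)) = some r := by
      by_cases hfx : pget p (c) = c
      · rw [hfx]; exact h
      · rcases Nat.exists_eq_succ_of_ne_zero (by omega : p.length ≠ 0) with ⟨L, hL⟩
        have h' := h
        rw [hL, rootF, if_neg hfx] at h'
        exact rootF_mono (by omega : L ≤ p.length) h'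
    rcases fp_specN p.length p hE (pget p (c)) r
      (pget_lt hE hclen) hrootj with ⟨p1, hfp, hlen, hE1, hpres⟩
    have hr : r < p.length := root_lt hE hclen h
    have hset : PySem.List.pySet? p1 v ((r:Nat):Int) = some (p1.set (c) ((r:Nat):Int)) := by
      unfold PySem.List.pySet?
      rw [hlen, hc.1]
      rfl
    have hneq : p.getD (c) 0 ≠ v := by
      rw [getD_cast hE hclen]; omega
    refine ⟨p1.set (c) ((r:Nat):Int), ?_, by simp [hlen], EntOK_set hE1 (by omega), ?_⟩
    · simp only [findParent, hget, getD_cast hE hclen, hfp, hset]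
      rw [if_neg (show ¬ ((pget p c : Nat) : Int) = v from by omega)]
    · intro f j s hs
      exact set_keep ⟨p.length, hpres _ _ _ h⟩ (hpres _ _ _ hs)

def LabInv (p c : List Int) : Prop :=
  p.length = c.length ∧ EntOK p ∧
  ∀ i < p.length, 0 ≤ c.getD i 0 ∧ rootF p.length p i = some (c.getD i 0).toNat

-- one find_parent call on a LabInv state: returns the label, keeps the invariant
theorem fp_call {p c : List Int} (hI : LabInv p c) {v : Int}
    (hIn : PySem.Raise.InRange p.length v) :
    ∃ p', findParent (p.length + 1) p v = some (p', c.getD (canonIx p.length v) 0) ∧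
      LabInv p' c ∧ p'.length = p.length := by
  obtain ⟨hlen, hE, hroots⟩ := hI
  have hclen := (pyIdx_canon hIn).2
  obtain ⟨hc0, hcroot⟩ := hroots _ hclen
  rcases fp_specI hE hIn hcroot with ⟨p', hfp, hplen, hE', hpres⟩
  have hcast : ((((c.getD (canonIx p.length v) 0).toNat : Nat)) : Int) = c.getD (canonIx p.length v) 0 := by omega
  refine ⟨p', by rw [hfp, hcast], ⟨by omega, hE', ?_⟩, hplen⟩
  intro i hi
  rw [hplen]
  exact ⟨(hroots i (by omega)).1, hpres _ _ _ (hroots i (by omega)).2⟩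

theorem step_ok {X : Int} {p c : List Int} {s : Int} (hI : LabInv p c) {e : Int × Int × Int}
    (hIn : e.2.2 ≥ X → PySem.Raise.InRange p.length e.1 ∧ PySem.Raise.InRange p.length e.2.1) :
    ∃ p' c' s', stepA X (some (p, s)) e = some (p', s') ∧
      stepB X (some (c, s)) e = some (c', s') ∧ LabInv p' c' ∧ p'.length = p.length := by
  by_cases hw : e.2.2 ≥ X
  case neg =>
    exact ⟨p, c, s, by simp only [stepA, if_neg hw], by simp only [stepB, if_neg hw], hI, rfl⟩
  obtain ⟨hu, hv⟩ := hIn hw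
  have hlen := hI.1
  have hculen := (pyIdx_canon hu).2
  have hcvlen := (pyIdx_canon hv).2
  set lu := canonIx p.length e.1 with hlu
  set lv := canonIx p.length e.2.1 with hlv
  set cu := c.getD lu 0 with hcu
  set cv := c.getD lv 0 with hcv
  -- B side: the two label lookups
  have hBu : PySem.List.pyGet? c e.1 = some cu := by
    unfold PySem.List.pyGet?
    rw [← hlen, (pyIdx_canon hu).1, ← hlu]
    simp only [List.getElem?_eq_getElem (show lu < c.length by omega), Option.bind_some,
      Option.some.injEq]
    rw [hcu]
    exact (List.getD_eq_getElem c 0 (show lu < c.length by omega)).symm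
  have hBv : PySem.List.pyGet? c e.2.1 = some cv := by
    unfold PySem.List.pyGet?
    rw [← hlen, (pyIdx_canon hv).1, ← hlv]
    simp only [List.getElem?_eq_getElem (show lv < c.length by omega), Option.bind_some,
      Option.some.injEq]
    rw [hcv]
    exact (List.getD_eq_getElem c 0 (show lv < c.length by omega)).symm
  -- A side: two finds for the comparison
  rcases fp_call hI hu with ⟨p1, hfp1, hI1, hlen1⟩
  rcases fp_call hI1 (by rw [hlen1]; exact hv) with ⟨p2, hfp2, hI2, hlen2⟩
  rw [hlen1] at hfp2 hlen2
  rw [← hlu] at hfp1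
  rw [← hlv] at hfp2
  by_cases heq : cu = cv
  · -- same component: no merge on either side
    refine ⟨p2, c, s, ?_, ?_, hI2, by omega⟩
    · simp only [stepA, if_pos hw, hfp1, hlen1, hfp2, ← hcu, ← hcv, heq]
      simp
    · simp only [stepB, if_pos hw, hBu, hBv, heq]
      simp
  · -- merge
    rcases fp_call hI2 (by rw [hlen2]; exact hu) with ⟨p3, hfp3, hI3, hlen3⟩
    rcases fp_call hI3 (by rw [hlen3, hlen2]; exact hv) with ⟨p4, hfp4, hI4, hlen4⟩
    rw [hlen2, ← hlu] at hfp3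
    rw [hlen3, hlen2, ← hlv] at hfp4
    rw [hlen2] at hlen3
    rw [hlen3] at hlen4
    obtain ⟨hlen', hE4, hroots4⟩ := hI4
    have hcu0 : 0 ≤ cu := (hI.2.2 _ hculen).1
    have hcv0 : 0 ≤ cv := (hI.2.2 _ hcvlen).1
    have hcuN : cu = ((cu.toNat : Nat) : Int) := by omega
    have hcvN : cv = ((cv.toNat : Nat) : Int) := by omega
    have hraN : cu.toNat < p.length := by
      have := root_lt hE4 (show lu < p4.length by omega) ((hroots4 lu (by omega)).2)
      omega
    have hrbN : cv.toNat < p.length := by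
      have := root_lt hE4 (show lv < p4.length by omega) ((hroots4 lv (by omega)).2)
      omega
    have hfixa : pget p4 cu.toNat = cu.toNat := rootF_fix ((hroots4 lu (by omega)).2)
    have hfixb : pget p4 cv.toNat = cv.toNat := rootF_fix ((hroots4 lv (by omega)).2)
    have hneN : cu.toNat ≠ cv.toNat := by omega
    set q := p4.set cv.toNat ((cu.toNat : Nat) : Int) with hq
    have hsetq : PySem.List.pySet? p4 cv cu = some q := by
      rw [hcvN, hcuN]
      exact PySem.List.pySet?_natCast p4 cv.toNat _ (by omega)
    set c' := c.map (fun x => if x = cv then cu else x) with hc'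
    have hc'getD : ∀ i < p.length, c'.getD i 0 = if c.getD i 0 = cv then cu else c.getD i 0 := by
      intro i hi
      rw [hc', List.getD_eq_getElem _ 0 (by simp; omega), List.getD_eq_getElem _ 0 (by omega),
        List.getElem_map]
    have hInvQ : LabInv q c' := by
      refine ⟨by simp [hq, hc']; omega, EntOK_set hE4 (by omega), ?_⟩
      intro i hi
      simp only [hq, List.length_set] at hi
      have hi' : i < p.length := by omega
      have hbase := (hroots4 i (by omega)).2
      have h0 : 0 ≤ c.getD i 0 := (hroots4 i (by omega)).1
      have hshift := union_shift hfixa hfixb (by omega) hneN hbase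
      have hEq : EntOK q := EntOK_set hE4 (by omega)
      have hboost := fuel_boost hEq (show i < q.length by simp [hq]; omega) hshift
      rw [hc'getD i hi']
      refine ⟨by split <;> omega, ?_⟩
      rw [hboost]
      congr 1
      split_ifs <;> omega
    refine ⟨q, c', s - 1, ?_, ?_, hInvQ, by simp [hq]; omega⟩
    · have hne' : cu ≠ cv := heq
      simp only [stepA, if_pos hw, hfp1, hlen1, hfp2, ← hcu, ← hcv,
        unionSets, hlen2, hfp3, hfp4]
      simp only [hne', ne_eq, not_false_eq_true, if_true, hsetq]
    · simp only [stepB, if_pos hw, hBu, hBv]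
      rw [if_pos heq, hc']

theorem loop_ok {X : Int} : ∀ (roads : List (Int × Int × Int)) (p c : List Int) (s : Int),
    LabInv p c →
    (∀ e ∈ roads, e.2.2 ≥ X → PySem.Raise.InRange p.length e.1 ∧ PySem.Raise.InRange p.length e.2.1) →
    ∃ p' c' s', List.foldl (stepA X) (some (p, s)) roads = some (p', s') ∧
      List.foldl (stepB X) (some (c, s)) roads = some (c', s') := by
  intro roads
  induction roads with
  | nil => intro p c s _ _; exact ⟨p, c, s, rfl, rfl⟩
  | cons e rest ih =>
    intro p c s hI hIn
    rcases step_ok (s := s) hI (hIn e (by simp)) with ⟨p1, c1, s1, hA, hB, hI1, hlen1⟩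
    rw [List.foldl_cons, hA, List.foldl_cons, hB]
    exact ih p1 c1 s1 hI1 (fun e' he' hw => by rw [hlen1]; exact hIn e' (by simp [he']) hw)

theorem init_eq (n : Int) :
    PySem.List.pyRange 0 n 1 = List.map (fun k : Nat => (k : Int)) (List.range n.toNat) := by
  by_cases hn : 0 ≤ n
  · have h : n = ((n.toNat : Nat) : Int) := by omega
    conv_lhs => rw [h, PySem.List.pyRange_zero_natCast]
  · have h1 : n.toNat = 0 := by omega
    rw [h1]
    unfold PySem.List.pyRange
    rw [if_neg one_ne_zero]
    simp
    omega

theorem init_inv (n : Int) : LabInv (PySem.List.pyRange 0 n 1) (PySem.List.pyRange 0 n 1) := by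
  rw [init_eq]
  have hlen : (List.map (fun k : Nat => (k : Int)) (List.range n.toNat)).length = n.toNat := by simp
  have hget : ∀ i < n.toNat, (List.map (fun k : Nat => (k : Int)) (List.range n.toNat)).getD i 0 = (i : Int) := by
    intro i hi
    rw [List.getD_eq_getElem _ _ (by simpa using hi)]
    simp
  refine ⟨rfl, ?_, ?_⟩
  · intro i hi
    rw [hlen] at hi
    rw [hget i hi]
    exact ⟨by omega, by rw [hlen]; omega⟩
  · intro i hi
    rw [hlen] at hi
    rw [hget i hi]
    refine ⟨by omega, ?_⟩
    have hfix : pget (List.map (fun k : Nat => (k : Int)) (List.range n.toNat)) i = i := by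
      unfold pget; rw [hget i hi]; omega
    rw [hlen, show ((i : Int)).toNat = i by omega]
    exact rootF_of_fix hfix (by omega)

-- ===== VERDICT (by name: the statement is the Claim_ definition above) =====
theorem count_states_spec : Claim_equal_count_states := by
  unfold Claim_equal_count_states
  intro n roads X _ hPre
  unfold Spec_count_states count_states count_states_alt
  have hlen0 : (PySem.List.pyRange 0 n 1).length = n.toNat := by rw [init_eq]; simp
  rcases loop_ok roads _ _ n (init_inv n)
    (fun e he hw => by rw [hlen0]; exact hPre e he hw) with ⟨p', c', s', hA, hB⟩
  rw [hA, hB]
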